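-- pv_equiv track=rewrite | github.com/dtcenter/METplus | internal_tests/use_cases/metplus_use_case_suite.py | _extract_category_lists
-- ===== SOURCE A (Python) =====
-- def _extract_category_lists(lines):
--     """! Look for categories (lines that start with Category). Group the
--     lines by use case category.
--     @param lines List of all lines from the file
--     @returns Dictionary with category name as key and list of use cases as the
--     value
--     """
--     header_indices = [i for i, value in enumerate(lines)
--                       if value.startswith('Category')]
--
--     category_lists = []
--     for idx, header_index in enumerate(header_indices[:-1]):
--         start_idx = header_index
--         end_idx = header_indices[idx+1]
--         category_lists.append(lines[start_idx:end_idx])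
--
--     last_idx = header_indices[-1]
--     category_lists.append(lines[last_idx:])
--
--     category_dict = {}
--     # extract category name to use as key in output dictionary
--     # value will contain a list of the rest of the lines
--     for category_list in category_lists:
--         # first line contains category name after 'Category:'
--         # so get text after : and strip off whitespace
--         category = category_list[0].split(':')[1].strip()
--         if category in category_dict.keys():
--             raise KeyError(f'Duplicate category in use cases file: {category}')
--
--         # remove first item in list that contains the category name
--         use_case_list = category_list[1:]
--         # remove empty lines and commented out lines
--         use_case_list = [use_case for use_case in use_case_list
--                          if use_case.strip() and
--                          not use_case.strip().startswith('#')]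
--         category_dict[category] = use_case_list
--
--     return category_dict
-- ===== SOURCE B (Python) =====
-- def _extract_category_lists(lines):
--     """Single pass: maintain the current category name and its item list,
--     flushing into the result dict when the next header (or the end) is reached."""
--     category_dict = {}
--     name = None
--     items = None
--     for line in lines:
--         if line.startswith('Category'):
--             if name is not None:
--                 category_dict[name] = items
--             name = line.split(':')[1].strip()
--             if name in category_dict:
--                 raise KeyError(f'Duplicate category in use cases file: {name}')
--             items = []
--         elif name is not None:
--             stripped = line.strip()
--             if stripped and not stripped.startswith('#'):
--                 items.append(line)
--     if name is None:
--         raise ValueError('no categories found in use cases file')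
--     category_dict[name] = items
--     return category_dict
-- ===== Notes on version B (the rewrite author's own statement) =====
-- stated objective: simpler
-- what changed: A scans for header indices, assembles slices between consecutive headers, then filters each slice; B is a single pass over the lines that keeps the current category name and item list and flushes them into the dict at each new header (and at the end).
import Mathlib
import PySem

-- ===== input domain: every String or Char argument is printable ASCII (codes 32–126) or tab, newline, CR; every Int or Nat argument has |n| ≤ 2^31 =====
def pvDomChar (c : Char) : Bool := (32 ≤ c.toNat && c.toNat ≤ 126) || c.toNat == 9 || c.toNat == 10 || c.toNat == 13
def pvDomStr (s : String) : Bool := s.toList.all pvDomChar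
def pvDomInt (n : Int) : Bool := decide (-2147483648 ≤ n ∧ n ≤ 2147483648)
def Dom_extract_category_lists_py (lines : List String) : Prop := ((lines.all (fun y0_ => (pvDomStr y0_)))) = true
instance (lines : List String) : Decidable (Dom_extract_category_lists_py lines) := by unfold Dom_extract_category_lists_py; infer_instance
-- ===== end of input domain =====

-- B replaces A's three passes (index scan, slice assembly, per-slice filtering) by a single pass
-- that flushes the current category's filtered lines at each header; equal return values on Pre_.

-- shared atomic predicates (used by the ports, Pre_ and Raises_)
def pvIsH (s : String) : Bool := PySem.Str.startswith s "Category"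
def pvCat (s : String) : String := PySem.Str.strip ((PySem.List.pyGet? ((PySem.Str.split? s ":").getD []) 1).getD "")
def pvKeep (u : String) : Bool := (PySem.Str.strip u != "") && !(PySem.Str.startswith (PySem.Str.strip u) "#")

-- ===== PORT A =====
def extract_category_lists_py (lines : List String) : List (String × List String) :=
  -- header_indices = [i for i, value in enumerate(lines) if value.startswith('Category')]
  let header_indices : List Int :=
    ((PySem.List.enumerate lines).filter (fun p => pvIsH p.2)).map (·.1)
  -- for idx, header_index in enumerate(header_indices[:-1]): category_lists.append(lines[start:end])
  let category_lists : List (List String) :=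
    (PySem.List.enumerate (PySem.List.slice header_indices none (some (-1)))).foldl
      (fun acc p =>
        acc ++ [PySem.List.slice lines (some p.2)
                  (some ((PySem.List.pyGet? header_indices (p.1 + 1)).getD 0))]) []
  match PySem.List.pyGet? header_indices (-1) with
  | none => []  -- header_indices[-1] raises IndexError in Python (no header); excluded by Pre_
  | some last_idx =>
    let category_lists := category_lists ++ [PySem.List.slice lines (some last_idx) none]
    (category_lists.foldl
      (fun (d : PySem.Dict String (List String)) category_list =>
        let category := pvCat ((PySem.List.pyGet? category_list 0).getD "")
        -- 'if category in category_dict: raise KeyError' — duplicates excluded by Pre_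
        let use_case_list := PySem.List.slice category_list (some 1) none
        let use_case_list := use_case_list.filter pvKeep
        d.insert category use_case_list)
      PySem.Dict.empty).items

-- ===== PORT B =====
def pvAltStep (st : PySem.Dict String (List String) × Option (String × List String))
    (line : String) : PySem.Dict String (List String) × Option (String × List String) :=
  if pvIsH line then
    let d := match st.2 with
      | some (k, items) => st.1.insert k items   -- flush the finished category
      | none => st.1
    -- 'if name in category_dict: raise KeyError' — duplicates excluded by Pre_
    (d, some (pvCat line, []))
  else
    match st.2 with
    | none => st
    | some (k, items) =>
      if pvKeep line then (st.1, some (k, items ++ [line])) else st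

def extract_category_lists_py_alt (lines : List String) : List (String × List String) :=
  let st := lines.foldl pvAltStep (PySem.Dict.empty, none)
  (match st.2 with
   | some (k, items) => st.1.insert k items
   | none => st.1   -- name is None: Python B raises ValueError here (excluded by Pre_); st.1 is still empty
   ).items

-- ===== PRECONDITION & SPEC =====
-- Pre_ excludes exactly the inputs where the Python A raises: no 'Category' header at all
-- (IndexError), a header line without ':' (IndexError on split(':')[1]), or two headers
-- naming the same category (KeyError).
def Pre_extract_category_lists_py (lines : List String) : Prop :=
  (lines.any pvIsH = true) ∧
  (∀ l ∈ lines, pvIsH l = true → 2 ≤ ((PySem.Str.split? l ":").getD []).length) ∧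
  ((lines.filter pvIsH).map pvCat).Nodup
instance (lines : List String) : Decidable (Pre_extract_category_lists_py lines) := by
  unfold Pre_extract_category_lists_py; infer_instance
def pvWitness_extract_category_lists_py : List String :=
  ["Category: met_tool", "  use_case_a", "# comment", "", "Category: other", "use_case_b"]

def Spec_extract_category_lists_py (lines : List String) (out : List (String × List String)) : Prop :=
  out = extract_category_lists_py_alt lines
instance (lines : List String) (out : List (String × List String)) :
    Decidable (Spec_extract_category_lists_py lines out) := by
  unfold Spec_extract_category_lists_py; infer_instance

-- ===== CLAIM (what is proved, stated in full; the proofs are below) =====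
def Claim_equal_extract_category_lists_py : Prop :=
  ∀ (lines : List String), Dom_extract_category_lists_py lines →
    Pre_extract_category_lists_py lines →
    Spec_extract_category_lists_py lines (extract_category_lists_py lines)
-- ===== LEMMAS AND PROOFS =====

-- the common intermediate form: the lines grouped at the headers, each group mapped to its entry
def pvP (s : String) : Bool := !pvIsH s

def pvGroups : List String → List (List String)
  | [] => []
  | x :: ls =>
    if pvIsH x then (x :: ls.takeWhile pvP) :: pvGroups (ls.dropWhile pvP)
    else pvGroups ls
termination_by ls => ls.length
decreasing_by
  · have := List.length_dropWhile_le pvP ls; simp; omega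
  · simp

def pvEntry (g : List String) : String × List String :=
  (pvCat (g.headD ""), (g.drop 1).filter pvKeep)

def pvBuild (gs : List (List String)) : List (String × List String) := gs.map pvEntry

-- A-side: characterise the header-index scan and the slice assembly
def pvNIdx : List String → List Nat
  | [] => []
  | x :: ls => (if pvIsH x then [0] else []) ++ (pvNIdx ls).map (· + 1)

theorem pvEnumChar (ls : List String) : ∀ (s : Int),
    ((PySem.List.enumerate ls s).filter (fun p => pvIsH p.2)).map (·.1)
      = (pvNIdx ls).map (fun (n : Nat) => s + (n : Int)) := by
  induction ls with
  | nil => intro s; simp [pvNIdx]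
  | cons x ls ih =>
    intro s
    rw [PySem.List.enumerate_cons, List.filter_cons]
    rcases hx : pvIsH x with _ | _
    · simp only [pvNIdx, hx, Bool.false_eq_true, if_false, List.nil_append]
      rw [ih (s + 1), List.map_map]
      apply List.map_congr_left
      intro n _
      simp only [Function.comp_apply]
      push_cast; ring
    · simp only [pvNIdx, hx, if_true, List.singleton_append, List.map_cons]
      rw [ih (s + 1), List.map_map]
      refine congrArg₂ _ (by simp) ?_
      apply List.map_congr_left
      intro n _
      simp only [Function.comp_apply]
      push_cast; ring

theorem pvNIdx_eq_nil_iff (ls : List String) :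
    pvNIdx ls = [] ↔ ∀ l ∈ ls, pvIsH l = false := by
  induction ls with
  | nil => simp [pvNIdx]
  | cons x ls ih =>
    by_cases hx : pvIsH x = true <;> simp [pvNIdx, hx, ih]

theorem pvNoH_take (ls : List String) (h : pvNIdx ls = []) :
    ls.takeWhile pvP = ls ∧ ls.dropWhile pvP = [] := by
  induction ls with
  | nil => simp
  | cons x ls ih =>
    rw [pvNIdx_eq_nil_iff] at h
    have hx : pvP x = true := by simp [pvP, h x (by simp)]
    have h' : pvNIdx ls = [] := (pvNIdx_eq_nil_iff ls).mpr (fun l hl => h l (by simp [hl]))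
    simp [hx, (ih h').1, (ih h').2]

theorem pvFirst_take (ls : List String) : ∀ (m : Nat) (ms : List Nat),
    pvNIdx ls = m :: ms → ls.takeWhile pvP = ls.take m := by
  induction ls with
  | nil => intro m ms h; simp [pvNIdx] at h
  | cons x ls ih =>
    intro m ms h
    by_cases hx : pvIsH x = true
    · simp only [pvNIdx, hx, if_true, List.singleton_append, List.cons.injEq] at h
      simp [pvP, hx, ← h.1]
    · have hx' : pvIsH x = false := by simpa using hx
      simp only [pvNIdx, hx', if_false, List.nil_append, Bool.false_eq_true] at h
      rcases hn : pvNIdx ls with _ | ⟨m', ms'⟩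
      · rw [hn] at h; simp at h
      · rw [hn] at h
        simp only [List.map_cons, List.cons.injEq] at h
        have := ih m' ms' hn
        simp [pvP, hx', this, ← h.1]

def pvChunks (ls : List String) : List Nat → List (List String)
  | [] => []
  | n :: ns => List.zipWith (fun a b => List.take (b - a) (List.drop a ls)) (n :: ns) ns
      ++ [ls.drop ((ns.getLast?).getD n)]

theorem pvGetLast?_cons {α : Type} (a : α) (l : List α) :
    (a :: l).getLast? = some ((l.getLast?).getD a) := by
  cases l with
  | nil => rfl
  | cons b t =>
    rw [List.getLast?_cons_cons]
    rcases h : (b :: t).getLast? with _ | y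
    · simp at h
    · simp

theorem pvChunks_shift (x : String) (ls : List String) (ns : List Nat) :
    pvChunks (x :: ls) (ns.map (· + 1)) = pvChunks ls ns := by
  cases ns with
  | nil => rfl
  | cons n ns =>
    simp only [List.map_cons, pvChunks, List.getLast?_map]
    congr 1
    · rw [show (n + 1) :: ns.map (· + 1) = (n :: ns).map (· + 1) from rfl, List.zipWith_map]
      simp [Nat.add_sub_add_right, List.drop_succ_cons]
    · rcases h : ns.getLast? with _ | y <;> simp [List.drop_succ_cons]

theorem pvGroups_dropWhile (ls : List String) :
    pvGroups (ls.dropWhile pvP) = pvGroups ls := by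
  induction ls with
  | nil => simp
  | cons x ls ih =>
    by_cases hx : pvIsH x = true
    · simp [pvP, hx]
    · have hx' : pvIsH x = false := by simpa using hx
      rw [List.dropWhile_cons]
      simp only [pvP, hx', Bool.not_false, if_true]
      rw [ih]
      conv_rhs => rw [pvGroups]
      simp [hx']

theorem pvChunks_eq_groups (ls : List String) : ∀ (n : Nat) (ns : List Nat),
    pvNIdx ls = n :: ns → pvChunks ls (n :: ns) = pvGroups ls := by
  induction ls with
  | nil => intro n ns h; simp [pvNIdx] at h
  | cons x ls ih =>
    intro n ns h
    by_cases hx : pvIsH x = true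
    · simp only [pvNIdx, hx, if_true, List.singleton_append, List.cons.injEq] at h
      rcases hn : pvNIdx ls with _ | ⟨m, ms⟩
      · rw [hn] at h
        simp only [List.map_nil] at h
        obtain ⟨hnoTake, hnoDrop⟩ := pvNoH_take ls hn
        rw [← h.1, ← h.2]
        rw [pvGroups]
        simp [hx, pvChunks, hnoTake, hnoDrop, pvGroups]
      · rw [hn] at h
        have hshift := pvChunks_shift x ls (m :: ms)
        have hih := ih m ms hn
        have htake := pvFirst_take ls m ms hn
        have hchunks : pvChunks (x :: ls) (0 :: (m + 1) :: ms.map (· + 1))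
            = List.take (m + 1) (x :: ls) :: pvChunks (x :: ls) ((m + 1) :: ms.map (· + 1)) := by
          simp [pvChunks, pvGetLast?_cons]
        rw [← h.1, ← h.2, pvGroups]
        simp only [hx, if_true]
        rw [show List.map (· + 1) (m :: ms) = (m + 1) :: ms.map (· + 1) from rfl, hchunks,
            show (m + 1) :: ms.map (· + 1) = List.map (· + 1) (m :: ms) from rfl, hshift, hih,
            ← pvGroups_dropWhile ls, List.take_succ_cons, htake]
    · have hx' : pvIsH x = false := by simpa using hx
      simp only [pvNIdx, hx', if_false, List.nil_append, Bool.false_eq_true] at h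
      rcases hn : pvNIdx ls with _ | ⟨m, ms⟩
      · rw [hn] at h; simp at h
      · rw [hn] at h
        simp only [List.map_cons, List.cons.injEq] at h
        have : pvGroups (x :: ls) = pvGroups ls := by rw [pvGroups]; simp [hx']
        rw [this, ← ih m ms hn, ← pvChunks_shift x ls (m :: ms)]
        simp [h.1, h.2]

theorem pvTakeWhile_filter_nil (ls : List String) : (ls.takeWhile pvP).filter pvIsH = [] := by
  rw [List.filter_eq_nil_iff]
  intro a ha
  have := List.mem_takeWhile_imp ha
  simp [pvP] at this
  simp [this]

theorem pvGroups_shape (ls : List String) : ∀ g ∈ pvGroups ls, ∃ x t, g = x :: t := by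
  induction ls using pvGroups.induct with
  | case1 => simp [pvGroups]
  | case2 x ls hx ih =>
    rw [pvGroups]
    simp only [hx, if_true]
    intro g hg
    rcases List.mem_cons.mp hg with hg | hg
    · exact ⟨x, ls.takeWhile pvP, hg⟩
    · exact ih g hg
  | case3 x ls hx ih =>
    rw [pvGroups]
    simp only [hx, Bool.false_eq_true, if_false]
    exact ih

theorem pvGroups_heads (ls : List String) :
    (pvGroups ls).map (fun g => g.headD "") = ls.filter pvIsH := by
  induction ls using pvGroups.induct with
  | case1 => simp [pvGroups]
  | case2 x ls hx ih =>
    rw [pvGroups]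
    simp only [hx, if_true, List.map_cons, List.headD_cons, List.filter_cons]
    rw [ih]
    have hfd : List.filter pvIsH (List.dropWhile pvP ls) = List.filter pvIsH ls := by
      conv_rhs => rw [← List.takeWhile_append_dropWhile (p := pvP) (l := ls)]
      rw [List.filter_append, pvTakeWhile_filter_nil, List.nil_append]
    rw [hfd]
  | case3 x ls hx ih =>
    have hx' : pvIsH x = false := by simpa using hx
    rw [pvGroups]
    simp only [hx', Bool.false_eq_true, if_false, List.filter_cons]
    rw [ih]

theorem pvEnumPairs (ns : List Nat) (ls : List String) :
    (PySem.List.enumerate ((ns.map (fun (n : Nat) => (n : Int))).dropLast) 0).map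
      (fun p => PySem.List.slice ls (some p.2)
        (some ((PySem.List.pyGet? (ns.map (fun (n : Nat) => (n : Int))) (p.1 + 1)).getD 0)))
    = List.zipWith (fun a b => List.take (b - a) (List.drop a ls)) ns ns.tail := by
  apply List.ext_getElem
  · simp [PySem.List.length_enumerate]
  · intro k h1 h2
    have hk : k + 1 < ns.length := by
      simp [PySem.List.length_enumerate] at h1
      omega
    have hke : k < (PySem.List.enumerate ((ns.map (fun (n : Nat) => (n : Int))).dropLast) 0).length := by
      simpa using h1
    rw [List.getElem_map, PySem.List.getElem_enumerate _ _ k hke]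
    have hp2 : ((ns.map (fun (n : Nat) => (n : Int))).dropLast)[k]'(by simpa using hke)
        = ((ns[k]'(by omega) : Nat) : Int) := by
      rw [List.getElem_dropLast, List.getElem_map]
    have hidx : (0 + (k : Int) + 1) = (((k + 1 : Nat) : Nat) : Int) := by push_cast; ring
    rw [hp2, hidx, PySem.List.pyGet?_natCast]
    rw [List.getElem?_eq_getElem (by simpa using hk)]
    simp only [List.getElem_map, Option.getD_some]
    rw [PySem.List.slice_natCast]
    rw [List.getElem_zipWith, List.getElem_tail]

theorem extract_category_lists_py_eq_build (lines : List String)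
    (h : Pre_extract_category_lists_py lines) :
    extract_category_lists_py lines = pvBuild (pvGroups lines) := by
  obtain ⟨hany, -, hnodup⟩ := h
  have hidx : ((PySem.List.enumerate lines).filter (fun p => pvIsH p.2)).map (·.1)
      = (pvNIdx lines).map (fun (n : Nat) => (n : Int)) := by
    simpa using pvEnumChar lines 0
  rcases hn : pvNIdx lines with _ | ⟨n, ns⟩
  · exfalso
    obtain ⟨l, hl, hh⟩ := List.any_eq_true.mp hany
    have := (pvNIdx_eq_nil_iff lines).mp hn l hl
    simp [this] at hh
  · have hshape := pvGroups_shape lines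
    have hkeq : ∀ g ∈ pvGroups lines,
        pvCat ((PySem.List.pyGet? g 0).getD "") = pvCat (g.headD "") := by
      intro g hg
      obtain ⟨x, t, rfl⟩ := hshape g hg
      simp
    have hnd : ((pvGroups lines).map
        (fun g => pvCat ((PySem.List.pyGet? g 0).getD ""))).Nodup := by
      rw [List.map_congr_left hkeq]
      have : (pvGroups lines).map (fun g => pvCat (g.headD ""))
          = ((pvGroups lines).map (fun g => g.headD "")).map pvCat := by
        rw [List.map_map]; simp [Function.comp_def]
      rw [this, pvGroups_heads]
      exact hnodup
    have hfresh : ∀ g ∈ pvGroups lines,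
        (PySem.Dict.empty : PySem.Dict String (List String)).contains
          (pvCat ((PySem.List.pyGet? g 0).getD "")) = false :=
      fun g _ => PySem.Dict.contains_empty _
    have hfold := PySem.Dict.items_foldl_insert_fresh (pvGroups lines)
      (fun g => pvCat ((PySem.List.pyGet? g 0).getD ""))
      (fun g => (PySem.List.slice g (some 1) none).filter pvKeep)
      PySem.Dict.empty hfresh hnd
    simp only [extract_category_lists_py]
    rw [hidx, hn, PySem.List.pyGet?_neg_one, List.getLast?_map, pvGetLast?_cons,
        Option.map_some]
    simp only [PySem.List.foldl_append_singleton_eq_map, List.nil_append,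
      PySem.List.slice_to_neg_one]
    rw [pvEnumPairs (n :: ns) lines, PySem.List.slice_from_natCast]
    rw [show List.zipWith (fun a b => List.take (b - a) (List.drop a lines)) (n :: ns) (n :: ns).tail
          ++ [lines.drop ((ns.getLast?).getD n)] = pvChunks lines (n :: ns) from rfl]
    rw [pvChunks_eq_groups lines n ns hn]
    rw [hfold, show (PySem.Dict.empty : PySem.Dict String (List String)).items = [] from rfl,
       List.nil_append]
    apply List.map_congr_left
    intro g hg
    obtain ⟨x, t, rfl⟩ := hshape g hg
    simp [pvEntry, PySem.List.slice_from_one]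

def pvFlush (st : PySem.Dict String (List String) × Option (String × List String)) :
    PySem.Dict String (List String) :=
  match st.2 with
  | some (k, items) => st.1.insert k items
  | none => st.1

theorem pvNotContains_of_nodup {d : PySem.Dict String (List String)} {k : String}
    {rest : List String} (h : (d.keys ++ k :: rest).Nodup) : d.contains k = false := by
  rw [List.nodup_append] at h
  have hk : k ∉ d.keys := fun hm => h.2.2 k hm k (by simp) rfl
  rcases hb : d.contains k with _ | _
  · rfl
  · exact absurd ((PySem.Dict.contains_iff_mem_keys d k).mp hb) hk

theorem pvAlt_cur (ls : List String) : ∀ (d : PySem.Dict String (List String))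
    (k : String) (items : List String),
    (d.keys ++ k :: (ls.filter pvIsH).map pvCat).Nodup →
    (pvFlush (ls.foldl pvAltStep (d, some (k, items)))).items
      = d.items ++ (k, items ++ (ls.takeWhile pvP).filter pvKeep)
          :: pvBuild (pvGroups (ls.dropWhile pvP)) := by
  induction ls with
  | nil =>
    intro d k items h
    simp [pvFlush, PySem.Dict.items_insert_of_not_contains _ _ (pvNotContains_of_nodup h),
          pvGroups, pvBuild]
  | cons x ls ih =>
    intro d k items h
    by_cases hx : pvIsH x = true
    · have hnc : d.contains k = false := pvNotContains_of_nodup h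
      have hkeys : (d.insert k items).keys = d.keys ++ [k] :=
        PySem.Dict.keys_insert_of_not_contains _ _ hnc
      have h' : ((d.insert k items).keys ++ pvCat x :: (ls.filter pvIsH).map pvCat).Nodup := by
        rw [hkeys, List.append_assoc]
        simpa [hx] using h
      have := ih (d.insert k items) (pvCat x) [] h'
      simp only [List.foldl_cons, pvAltStep, hx, if_true]
      rw [this, PySem.Dict.items_insert_of_not_contains _ _ hnc]
      simp [pvP, hx, pvGroups, pvBuild, pvEntry]
    · have hx' : pvIsH x = false := by simpa using hx
      have hfilt : (x :: ls).filter pvIsH = ls.filter pvIsH := by simp [hx']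
      have hgroups : pvGroups (x :: ls) = pvGroups ls := by rw [pvGroups]; simp [hx']
      by_cases hk : pvKeep x = true
      · have := ih d k (items ++ [x]) (by rw [← hfilt]; exact h)
        simp only [List.foldl_cons, pvAltStep, hx', Bool.false_eq_true, if_false, hk, if_true]
        rw [this]
        simp [pvP, hx', hk]
      · have hk' : pvKeep x = false := by simpa using hk
        have := ih d k items (by rw [← hfilt]; exact h)
        simp only [List.foldl_cons, pvAltStep, hx', Bool.false_eq_true, if_false, hk',
          Bool.false_eq_true, if_false]
        rw [this]
        simp [pvP, hx', hk']

theorem pvAlt_none (ls : List String) : ∀ (d : PySem.Dict String (List String)),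
    (d.keys ++ (ls.filter pvIsH).map pvCat).Nodup →
    (pvFlush (ls.foldl pvAltStep (d, none))).items = d.items ++ pvBuild (pvGroups ls) := by
  induction ls with
  | nil => intro d h; simp [pvFlush, pvGroups, pvBuild]
  | cons x ls ih =>
    intro d h
    by_cases hx : pvIsH x = true
    · have h' : (d.keys ++ pvCat x :: (ls.filter pvIsH).map pvCat).Nodup := by
        simpa [hx] using h
      have := pvAlt_cur ls d (pvCat x) [] h'
      simp only [List.foldl_cons, pvAltStep, hx, if_true]
      rw [this]
      rw [pvGroups]
      simp [hx, pvBuild, pvEntry]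
    · have hx' : pvIsH x = false := by simpa using hx
      have hgroups : pvGroups (x :: ls) = pvGroups ls := by rw [pvGroups]; simp [hx']
      have := ih d (by simpa [hx'] using h)
      simp only [List.foldl_cons, pvAltStep, hx', Bool.false_eq_true, if_false]
      rw [this, hgroups]

theorem extract_category_lists_py_alt_eq_build (lines : List String)
    (h : Pre_extract_category_lists_py lines) :
    extract_category_lists_py_alt lines = pvBuild (pvGroups lines) := by
  have := pvAlt_none lines PySem.Dict.empty (by simpa using h.2.2)
  simpa [extract_category_lists_py_alt, pvFlush] using this

-- ===== VERDICT (by name: the statement is the Claim_ definition above) =====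
theorem extract_category_lists_py_spec : Claim_equal_extract_category_lists_py := by
  intro lines _ hpre
  unfold Spec_extract_category_lists_py
  rw [extract_category_lists_py_eq_build lines hpre,
      extract_category_lists_py_alt_eq_build lines hpre]
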